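-- pv_equiv track=rewrite | github.com/jatin-makes-ai/Agentic-RAG-for-Indian-law | scripts/text_to_chunks_v2.py | extract_lines_with_offsets
-- ===== SOURCE A (Python) =====
-- def extract_lines_with_offsets(text: str):
--     lines = []
--     idx = 0
--     for line in text.splitlines(keepends=True):
--         stripped = line.rstrip("\n")
--         lines.append((stripped, idx))
--         idx += len(line)
--     return lines
-- ===== SOURCE B (Python) =====
-- def extract_lines_with_offsets(text: str):
--     raw = text.splitlines(keepends=True)
--     offsets = [0]
--     for l in raw:
--         offsets.append(offsets[-1] + len(l))
--     return [(l.rstrip("\n"), o) for l, o in zip(raw, offsets)]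
-- ===== Notes on version B (the rewrite author's own statement) =====
-- stated objective: alternative
-- what changed: Replaces A's single loop that threads an idx accumulator with three separate passes: splitlines, a prefix-sum pass computing all start offsets, and a zip that strips and pairs.
import Mathlib
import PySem

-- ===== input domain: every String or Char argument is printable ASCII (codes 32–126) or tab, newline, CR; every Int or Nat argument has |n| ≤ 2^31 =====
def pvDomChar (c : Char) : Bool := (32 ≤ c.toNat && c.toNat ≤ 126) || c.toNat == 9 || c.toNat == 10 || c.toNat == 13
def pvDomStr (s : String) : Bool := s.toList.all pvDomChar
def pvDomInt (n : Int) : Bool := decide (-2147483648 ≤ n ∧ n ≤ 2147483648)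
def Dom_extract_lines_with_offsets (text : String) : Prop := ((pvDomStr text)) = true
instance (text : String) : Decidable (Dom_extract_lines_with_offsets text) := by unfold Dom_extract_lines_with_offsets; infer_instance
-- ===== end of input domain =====

-- B computes the start offsets by a separate prefix-sum pass over the line lengths instead of
-- threading an idx accumulator through the building loop; same O(n) cost, different decomposition.

-- Shared helper: text.splitlines(keepends=True), hand-ported. Exact on the Dom alphabet
-- (printable ASCII + tab + '\n' + '\r'), where the only line boundaries are '\n', '\r', '\r\n'.
def splitlinesKeepAux : List Char → List Char → List (List Char)
  | acc, [] => if acc.isEmpty then [] else [acc.reverse]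
  | acc, '\r' :: '\n' :: rest => (acc.reverse ++ ['\r', '\n']) :: splitlinesKeepAux [] rest
  | acc, '\r' :: rest => (acc.reverse ++ ['\r']) :: splitlinesKeepAux [] rest
  | acc, '\n' :: rest => (acc.reverse ++ ['\n']) :: splitlinesKeepAux [] rest
  | acc, c :: rest => splitlinesKeepAux (c :: acc) rest

-- Shared helper: line.rstrip("\n") — drop trailing '\n' characters (exact for any str).
def rstripNl (cs : List Char) : List Char := (cs.reverse.dropWhile (· == '\n')).reverse

-- ===== PORT A =====
def loopA : List (List Char) → List (String × Int) → Int → List (String × Int)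
  | [], lines, _ => lines
  | line :: rest, lines, idx =>
      loopA rest (lines ++ [(String.ofList (rstripNl line), idx)]) (idx + (line.length : Int))

def extract_lines_with_offsets (text : String) : List (String × Int) :=
  loopA (splitlinesKeepAux [] text.toList) [] 0

-- ===== PORT B =====
-- the offsets pass: offsets = [0]; for l in raw: offsets.append(offsets[-1] + len(l))
-- (accumulator kept reversed, head = Python's offsets[-1])
def offsetsLoop : List Int → List (List Char) → List Int
  | acc, [] => acc.reverse
  | acc, l :: rest => offsetsLoop ((acc.headD 0 + (l.length : Int)) :: acc) rest

def extract_lines_with_offsets_alt (text : String) : List (String × Int) :=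
  let raw := splitlinesKeepAux [] text.toList
  let offsets := offsetsLoop [0] raw
  List.zipWith (fun l o => (String.ofList (rstripNl l), o)) raw offsets

-- ===== PRECONDITION & SPEC =====
def Spec_extract_lines_with_offsets (text : String) (out : List (String × Int)) : Prop := out = extract_lines_with_offsets_alt text
instance (text : String) (out : List (String × Int)) : Decidable (Spec_extract_lines_with_offsets text out) := by unfold Spec_extract_lines_with_offsets; infer_instance

-- ===== CLAIM (what is proved, stated in full; the proofs are below) =====
def Claim_equal_extract_lines_with_offsets : Prop := ∀ (text : String), Dom_extract_lines_with_offsets text → Spec_extract_lines_with_offsets text (extract_lines_with_offsets text)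

-- ===== LEMMAS AND PROOFS =====

lemma offsetsLoop_eq (raw : List (List Char)) : ∀ (i0 : Int) (tl : List Int),
    offsetsLoop (i0 :: tl) raw
      = tl.reverse ++ ((raw.map fun l => (l.length : Int)).scanl (· + ·) i0) := by
  induction raw with
  | nil => intro i0 tl; simp [offsetsLoop, List.scanl]
  | cons l rest ih =>
      intro i0 tl
      rw [show offsetsLoop (i0 :: tl) (l :: rest)
            = offsetsLoop ((i0 + (l.length : Int)) :: i0 :: tl) rest from rfl]
      rw [ih, List.map_cons, List.scanl_cons]
      simp

lemma loopA_eq (raw : List (List Char)) : ∀ (out0 : List (String × Int)) (i0 : Int),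
    loopA raw out0 i0
      = out0 ++ List.zipWith (fun l o => (String.ofList (rstripNl l), o)) raw
          ((raw.map fun l => (l.length : Int)).scanl (· + ·) i0) := by
  induction raw with
  | nil => intro out0 i0; simp [loopA]
  | cons l rest ih =>
      intro out0 i0
      rw [show loopA (l :: rest) out0 i0
            = loopA rest (out0 ++ [(String.ofList (rstripNl l), i0)]) (i0 + (l.length : Int)) from rfl]
      rw [ih, List.map_cons, List.scanl_cons]
      simp

-- ===== VERDICT (by name: the statement is the Claim_ definition above) =====
theorem extract_lines_with_offsets_spec : Claim_equal_extract_lines_with_offsets := by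
  intro text _
  unfold Spec_extract_lines_with_offsets extract_lines_with_offsets extract_lines_with_offsets_alt
  rw [loopA_eq]
  show _ = List.zipWith _ (splitlinesKeepAux [] text.toList)
            (offsetsLoop [0] (splitlinesKeepAux [] text.toList))
  rw [offsetsLoop_eq]
  simp
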